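-- pv_equiv track=rewrite | github.com/ZiadSheriif/IntelliQuery | Modules/LSH.py | get_top_k_hamming_distances
-- ===== SOURCE A (Python) =====
-- def get_top_k_hamming_distances(query, buckets, top_k):
--     distances = []
--     # Calculate Hamming distance for each bucket
--     for bucket in buckets:
--         hamming_distance = sum(bit1 != bit2 for bit1, bit2 in zip(query, bucket))
--         distances.append((bucket, hamming_distance))
--     # Sort distances and get the top K
--     sorted_distances = sorted(distances, key=lambda x: x[1])
--     top_k_distances = sorted_distances[:top_k]
--     return top_k_distances
-- ===== SOURCE B (Python) =====
-- def get_top_k_hamming_distances(query, buckets, top_k):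
--     # Counting sort: group buckets by distance (0..len(query)), concatenate groups.
--     groups = [[] for _ in range(len(query) + 1)]
--     for bucket in buckets:
--         d = 0
--         for b1, b2 in zip(query, bucket):
--             if b1 != b2:
--                 d += 1
--         groups[d].append(bucket)
--     result = []
--     for d, grp in enumerate(groups):
--         for b in grp:
--             result.append((b, d))
--     return result[:top_k]
-- ===== Notes on version B (the rewrite author's own statement) =====
-- stated objective: alternative
-- what changed: Replaces the comparison sort (sorted by distance, then slice) with a counting sort: buckets are binned into len(query)+1 distance groups in one pass and the groups are concatenated in increasing distance, which reproduces the stable sort order exactly.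
import Mathlib
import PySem

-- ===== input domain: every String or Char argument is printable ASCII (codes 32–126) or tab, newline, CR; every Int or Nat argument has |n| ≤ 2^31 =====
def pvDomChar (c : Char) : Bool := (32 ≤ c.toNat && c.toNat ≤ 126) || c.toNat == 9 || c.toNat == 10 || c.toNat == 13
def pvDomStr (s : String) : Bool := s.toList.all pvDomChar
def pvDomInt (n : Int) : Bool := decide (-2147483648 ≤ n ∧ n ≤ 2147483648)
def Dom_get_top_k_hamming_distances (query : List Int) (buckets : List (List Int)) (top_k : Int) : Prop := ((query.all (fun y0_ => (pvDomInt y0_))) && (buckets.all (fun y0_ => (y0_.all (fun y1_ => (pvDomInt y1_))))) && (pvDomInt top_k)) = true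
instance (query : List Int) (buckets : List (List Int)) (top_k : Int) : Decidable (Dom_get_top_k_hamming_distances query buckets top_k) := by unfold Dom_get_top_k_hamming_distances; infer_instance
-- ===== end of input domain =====

-- B replaces A's comparison sort (sorted by distance, then slice) with a counting sort into
-- len(query)+1 distance groups concatenated in increasing distance; same value on every input.

-- ===== PORT A =====
def get_top_k_hamming_distances (query : List Int) (buckets : List (List Int)) (top_k : Int) : List (List Int × Int) :=
  let distances := buckets.foldl (fun acc bucket =>
      acc ++ [(bucket,
        (List.zip query bucket).foldl (fun s p => s + (if p.1 ≠ p.2 then 1 else 0)) (0 : Int))]) []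
  let sorted_distances := PySem.List.sorted distances (fun x => x.2)
  PySem.List.slice sorted_distances none (some top_k)

-- ===== PORT B =====
-- helper: the explicit distance loop of Source B ('d = 0; for b1,b2 in zip: if b1 != b2: d += 1')
def altDist (query bucket : List Int) : Int :=
  (List.zip query bucket).foldl (fun d p => if p.1 ≠ p.2 then d + 1 else d) 0

def get_top_k_hamming_distances_alt (query : List Int) (buckets : List (List Int)) (top_k : Int) : List (List Int × Int) :=
  let groups := buckets.foldl (fun g bucket =>
      -- groups[d].append(bucket): d is a count, so 0 ≤ d ≤ len(query) < len(groups); toNat/getD are exact here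
      let d := altDist query bucket
      g.set d.toNat (g.getD d.toNat [] ++ [bucket]))
    (List.replicate (query.length + 1) ([] : List (List Int)))
  let result := (PySem.List.enumerate groups).foldl (fun r dg =>
      dg.2.foldl (fun r b => r ++ [(b, dg.1)]) r) []
  PySem.List.slice result none (some top_k)

-- ===== PRECONDITION & SPEC =====
def Spec_get_top_k_hamming_distances (query : List Int) (buckets : List (List Int)) (top_k : Int) (out : List (List Int × Int)) : Prop := out = get_top_k_hamming_distances_alt query buckets top_k
instance (query : List Int) (buckets : List (List Int)) (top_k : Int) (out : List (List Int × Int)) : Decidable (Spec_get_top_k_hamming_distances query buckets top_k out) := by unfold Spec_get_top_k_hamming_distances; infer_instance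

-- ===== CLAIM (what is proved, stated in full; the proofs are below) =====
def Claim_equal_get_top_k_hamming_distances : Prop := ∀ (query : List Int) (buckets : List (List Int)) (top_k : Int), Dom_get_top_k_hamming_distances query buckets top_k → Spec_get_top_k_hamming_distances query buckets top_k (get_top_k_hamming_distances query buckets top_k)

-- ===== LEMMAS AND PROOFS =====

-- A's 'sum(bit1 != bit2 …)' fold equals B's counting fold, for every accumulator
theorem fold_acc_eq : ∀ (l : List (Int × Int)) (a : Int),
    l.foldl (fun s p => s + (if p.1 ≠ p.2 then 1 else 0)) a
      = l.foldl (fun d p => if p.1 ≠ p.2 then d + 1 else d) a := by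
  intro l
  induction l with
  | nil => intro a; rfl
  | cons x t ih =>
      intro a
      simp only [List.foldl_cons]
      rw [ih]
      congr 1
      split_ifs <;> omega

theorem dist_eq (query bucket : List Int) :
    (List.zip query bucket).foldl (fun s p => s + (if p.1 ≠ p.2 then 1 else 0)) (0 : Int)
      = altDist query bucket :=
  fold_acc_eq _ 0

theorem fold_count_bounds : ∀ (l : List (Int × Int)) (a : Int),
    a ≤ l.foldl (fun d p => if p.1 ≠ p.2 then d + 1 else d) a ∧
    l.foldl (fun d p => if p.1 ≠ p.2 then d + 1 else d) a ≤ a + l.length := by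
  intro l
  induction l with
  | nil => intro a; simp
  | cons x t ih =>
      intro a
      simp only [List.foldl_cons, List.length_cons]
      split_ifs
      · have := ih (a + 1); push_cast; push_cast at this; omega
      · have := ih a; push_cast; push_cast at this; omega

theorem altDist_nonneg (query bucket : List Int) : 0 ≤ altDist query bucket :=
  (fold_count_bounds _ 0).1

theorem altDist_le (query bucket : List Int) : altDist query bucket ≤ (query.length : Int) := by
  have h := (fold_count_bounds (List.zip query bucket) 0).2
  have h2 : (List.zip query bucket).length ≤ query.length := by
    simp [List.length_zip]
  unfold altDist
  omega

-- a foldl that appends one mapped element per step is map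
theorem foldl_append_singleton {α β : Type} (f : α → β) (l : List α) (init : List β) :
    l.foldl (fun acc x => acc ++ [f x]) init = init ++ l.map f := by
  induction l generalizing init with
  | nil => simp
  | cons x t ih => simp [ih]

-- insertBy places x after every element it is not 'before' and in front of the rest
theorem insertBy_append {α : Type} (before : α → α → Bool) (x : α) (l1 l2 : List α)
    (h1 : ∀ y ∈ l1, before x y = false) (h2 : ∀ y ∈ l2, before x y = true) :
    PySem.List.insertBy before x (l1 ++ l2) = l1 ++ x :: l2 := by
  induction l1 with
  | nil =>
      cases l2 with
      | nil => rfl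
      | cons y t =>
          show (if before x y then x :: y :: t else y :: PySem.List.insertBy before x t) = _
          rw [h2 y (by simp)]
          simp
  | cons y t ih =>
      show (if before x y then _ else y :: PySem.List.insertBy before x (t ++ l2)) = _
      rw [h1 y (by simp)]
      simp only [Bool.false_eq_true, if_false, List.cons_append, List.cons.injEq, true_and]
      exact ih (fun z hz => h1 z (by simp [hz]))

-- the stable sort by an Int key ranging over 0..n is the concatenation of the key classes
theorem sorted_snd_eq_flatMap {α : Type} (xs : List (α × Int)) (n : Nat)
    (h : ∀ p ∈ xs, 0 ≤ p.2 ∧ p.2 ≤ (n : Int)) :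
    PySem.List.sorted xs (fun p => p.2)
      = (List.range (n + 1)).flatMap (fun (d : Nat) => xs.filter (fun p => p.2 = (d : Int))) := by
  induction xs using List.reverseRecOn with
  | nil =>
      rw [show (PySem.List.sorted ([] : List (α × Int)) (fun p => p.2)) = [] from rfl]
      simp
  | append_singleton xs x ih =>
      have hx := h x (by simp)
      have hxs : ∀ p ∈ xs, 0 ≤ p.2 ∧ p.2 ≤ (n : Int) := fun p hp => h p (by simp [hp])
      rw [PySem.List.sorted_eq_foldl_insertBy, List.foldl_append, List.foldl_cons, List.foldl_nil,
        ← PySem.List.sorted_eq_foldl_insertBy, ih hxs]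
      set d0 := x.2.toNat with hd0def
      have hcast : (d0 : Int) = x.2 := Int.toNat_of_nonneg hx.1
      have hd0n : d0 ≤ n := by omega
      have hsplit : n + 1 = (d0 + 1) + (n - d0) := by omega
      rw [hsplit, List.range_add, List.range_succ]
      simp only [List.flatMap_append, List.flatMap_map, List.flatMap_cons, List.flatMap_nil,
        List.append_nil]
      have hfilt_lt : ∀ d ∈ List.range d0, (xs ++ [x]).filter (fun p => p.2 = (d : Int))
          = xs.filter (fun p => p.2 = (d : Int)) := by
        intro d hd
        rw [List.mem_range] at hd
        have : ¬ (x.2 = (d : Int)) := by omega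
        simp [List.filter_append, this]
      have hfilt_gt : ∀ j ∈ List.range (n - d0), (xs ++ [x]).filter (fun p => p.2 = ((d0 + 1 + j : Nat) : Int))
          = xs.filter (fun p => p.2 = ((d0 + 1 + j : Nat) : Int)) := by
        intro j hj
        have hne : ¬ x.2 = (d0 : Int) + 1 + (j : Int) := by omega
        simp [List.filter_append, hne]
      rw [List.flatMap_congr hfilt_lt, List.flatMap_congr hfilt_gt]
      have hfilt_d0 : (xs ++ [x]).filter (fun p => p.2 = (d0 : Int))
          = xs.filter (fun p => p.2 = (d0 : Int)) ++ [x] := by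
        simp [List.filter_append, hcast]
      rw [hfilt_d0]
      have := insertBy_append (fun a b => decide ((fun p : α × Int => p.2) a < (fun p : α × Int => p.2) b)) x
        ((List.range d0).flatMap (fun (d : Nat) => xs.filter (fun p => p.2 = (d : Int)))
          ++ xs.filter (fun p => p.2 = (d0 : Int)))
        ((List.range (n - d0)).flatMap (fun (j : Nat) => xs.filter (fun p => p.2 = ((d0 + 1 + j : Nat) : Int))))
        (by
          intro y hy
          simp only [List.mem_append, List.mem_flatMap, List.mem_filter, List.mem_range] at hy
          have hyle : y.2 ≤ (d0 : Int) := by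
            rcases hy with ⟨d, hd, _, hy2⟩ | ⟨_, hy2⟩
            · have : y.2 = (d : Int) := by simpa using hy2
              omega
            · have : y.2 = (d0 : Int) := by simpa using hy2
              omega
          simp only [decide_eq_false_iff_not, not_lt]
          omega)
        (by
          intro y hy
          simp only [List.mem_flatMap, List.mem_filter, List.mem_range] at hy
          rcases hy with ⟨j, hj, _, hy2⟩
          have : y.2 = ((d0 + 1 + j : Nat) : Int) := by simpa using hy2
          simp only [decide_eq_true_eq]
          push_cast at this
          omega)
      have hbeta : (fun a b => decide ((fun p : α × Int => p.2) a < (fun p : α × Int => p.2) b))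
          = (fun (a b : α × Int) => decide (a.2 < b.2)) := rfl
      rw [hbeta] at this
      rw [this]
      simp [List.append_assoc]

theorem set_map_range {α : Type} (f : Nat → α) (m i : Nat) (v : α) :
    ((List.range m).map f).set i v = (List.range m).map (fun d => if d = i then v else f d) := by
  apply List.ext_getElem
  · simp
  · intro j h1 h2
    simp only [List.getElem_set, List.getElem_map, List.getElem_range]
    split_ifs with h3 h4 h4 <;> first | rfl | omega

theorem getD_map_range {α : Type} (f : Nat → α) (m i : Nat) (hi : i < m) (d : α) :
    ((List.range m).map f).getD i d = f i := by
  rw [List.getD_eq_getElem _ _ (by simpa using hi)]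
  simp

-- B's grouping fold builds exactly the filtered distance classes
theorem groups_eq (query : List Int) (buckets : List (List Int)) :
    buckets.foldl (fun g bucket =>
        g.set (altDist query bucket).toNat
          (g.getD (altDist query bucket).toNat [] ++ [bucket]))
      (List.replicate (query.length + 1) ([] : List (List Int)))
      = (List.range (query.length + 1)).map
          (fun (d : Nat) => buckets.filter (fun b => altDist query b = (d : Int))) := by
  induction buckets using List.reverseRecOn with
  | nil => simp [List.map_const']
  | append_singleton xs x ih =>
      rw [List.foldl_append, List.foldl_cons, List.foldl_nil, ih]
      set d0 := (altDist query x).toNat with hd0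
      have hcast : (d0 : Int) = altDist query x := Int.toNat_of_nonneg (altDist_nonneg query x)
      have hlt : d0 < query.length + 1 := by
        have := altDist_le query x
        omega
      rw [getD_map_range _ _ _ hlt, set_map_range]
      apply List.map_congr_left
      intro d hd
      rw [List.mem_range] at hd
      simp only [List.filter_append]
      by_cases h : d = d0
      · subst h
        simp [hcast]
      · have : ¬ (altDist query x = (d : Int)) := by
          intro he
          apply h
          rw [← hcast] at he
          exact_mod_cast he.symm
        simp [this, h]

theorem enumerate_map_range' {α : Type} (f : Nat → α) :
    ∀ (m a : Nat), PySem.List.enumerate ((List.range' a m).map f) (a : Int)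
      = (List.range' a m).map (fun (d : Nat) => ((d : Int), f d)) := by
  intro m
  induction m with
  | zero => intro a; rfl
  | succ k ih =>
      intro a
      rw [List.range'_succ]
      show ((a : Int), f a) :: PySem.List.enumerate ((List.range' (a + 1) k).map f) ((a : Int) + 1) = _
      have : ((a : Int) + 1) = ((a + 1 : Nat) : Int) := by push_cast; ring
      rw [this, ih (a + 1)]
      simp

theorem enumerate_map_range {α : Type} (f : Nat → α) (m : Nat) :
    PySem.List.enumerate ((List.range m).map f) 0
      = (List.range m).map (fun (d : Nat) => ((d : Int), f d)) := by
  rw [List.range_eq_range']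
  have := enumerate_map_range' f m 0
  simpa using this

-- ===== VERDICT (by name: the statement is the Claim_ definition above) =====
theorem get_top_k_hamming_distances_spec : Claim_equal_get_top_k_hamming_distances := by
  intro query buckets top_k _
  show get_top_k_hamming_distances query buckets top_k = get_top_k_hamming_distances_alt query buckets top_k
  unfold get_top_k_hamming_distances get_top_k_hamming_distances_alt
  simp only [dist_eq, foldl_append_singleton, List.nil_append, groups_eq, enumerate_map_range,
    PySem.List.foldl_append_eq_flatMap, List.flatMap_map]
  refine congrArg (fun l => PySem.List.slice l none (some top_k)) ?_
  rw [sorted_snd_eq_flatMap (buckets.map (fun b => (b, altDist query b))) query.length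
    (by
      intro p hp
      rw [List.mem_map] at hp
      rcases hp with ⟨b, _, rfl⟩
      exact ⟨altDist_nonneg query b, altDist_le query b⟩)]
  apply List.flatMap_congr
  intro d _
  rw [List.filter_map]
  apply List.map_congr_left
  intro b hb
  rw [List.mem_filter] at hb
  have : altDist query b = (d : Int) := by simpa using hb.2
  simp [this]
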